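-- pv_equiv track=rewrite | github.com/apanykovc/slonyara2.0-telegram-meeting-bot | telegram_meeting_bot/ui/texts.py | _trim_entries_for_display
-- ===== SOURCE A (Python) =====
-- from typing import Any, Dict, Iterable, Sequence
--
-- def _trim_entries_for_display(entries: Sequence[str], limit: int) -> tuple[list[str], bool]:
--     selected = list(entries)
--     truncated = False
--     if not selected:
--         return selected, truncated
--     total_length = sum(len(item) for item in selected) + max(len(selected) - 1, 0) * 2
--     while selected and total_length > limit:
--         selected.pop(0)
--         truncated = True
--         total_length = sum(len(item) for item in selected) + max(len(selected) - 1, 0) * 2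
--     return selected, truncated
-- ===== SOURCE B (Python) =====
-- def _trim_entries_for_display(entries, limit):
--     total = 0
--     kept = 0
--     for item in reversed(entries):
--         add = len(item) + (2 if kept else 0)
--         if total + add > limit:
--             break
--         total += add
--         kept += 1
--     return list(entries[len(entries) - kept:]), kept < len(entries)
-- ===== Notes on version B (the rewrite author's own statement) =====
-- stated objective: faster
-- what changed: Instead of repeatedly popping the first entry and recomputing the full sum each iteration, B makes a single backward pass over the entries, maintaining a running display length and a kept-count, and returns the kept suffix directly.
import Mathlib
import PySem

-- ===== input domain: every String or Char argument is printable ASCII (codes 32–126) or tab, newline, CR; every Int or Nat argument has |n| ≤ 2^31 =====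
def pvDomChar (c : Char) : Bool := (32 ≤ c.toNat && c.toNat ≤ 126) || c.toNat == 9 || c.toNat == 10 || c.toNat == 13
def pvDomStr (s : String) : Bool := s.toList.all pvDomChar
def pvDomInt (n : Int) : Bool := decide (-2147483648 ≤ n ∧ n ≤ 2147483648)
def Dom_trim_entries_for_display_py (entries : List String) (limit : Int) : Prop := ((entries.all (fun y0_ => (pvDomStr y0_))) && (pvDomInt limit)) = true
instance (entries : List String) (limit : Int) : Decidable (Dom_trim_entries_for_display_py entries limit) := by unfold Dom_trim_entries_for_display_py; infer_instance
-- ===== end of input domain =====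

-- B replaces A's repeated pop-and-recompute loop (quadratic) with one backward pass that
-- keeps a running display length and returns the kept suffix; return values proved equal.
-- ===== PORT A =====
-- A recomputes sum(len)+2*(n-1) and pops from the front until it fits.
def pvTotalLen (l : List String) : Int :=
  (l.map (fun s => PySem.Str.len s)).sum + (max ((l.length : Int) - 1) 0) * 2

-- the while loop of A: structural recursion on selected (pop(0) = tail)
def pvLoopA (limit : Int) : List String → Bool → List String × Bool
  | [], truncated => ([], truncated)
  | x :: xs, truncated =>
      if pvTotalLen (x :: xs) > limit then pvLoopA limit xs true
      else (x :: xs, truncated)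

def trim_entries_for_display_py (entries : List String) (limit : Int) : List String × Bool :=
  let selected := entries
  let truncated := false
  if selected.isEmpty then (selected, truncated)
  else pvLoopA limit selected truncated

-- ===== PORT B =====
-- B: one backward pass keeping a running display length and a kept-count (break = return kept).
def pvLoopB (limit : Int) : List String → Int → Nat → Nat
  | [], _, kept => kept
  | item :: rest, total, kept =>
      let add := PySem.Str.len item + (if kept ≠ 0 then 2 else 0)
      if total + add > limit then kept
      else pvLoopB limit rest (total + add) (kept + 1)

def trim_entries_for_display_py_alt (entries : List String) (limit : Int) : List String × Bool :=
  let kept := pvLoopB limit entries.reverse 0 0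
  -- entries[len(entries)-kept:] : kept ≤ len(entries), so the index is the nonnegative Nat difference
  (PySem.List.slice entries (some ((entries.length - kept : Nat) : Int)) none,
   decide (kept < entries.length))

-- ===== PRECONDITION & SPEC =====
def Spec_trim_entries_for_display_py (entries : List String) (limit : Int) (out : List String × Bool) : Prop := out = trim_entries_for_display_py_alt entries limit
instance (entries : List String) (limit : Int) (out : List String × Bool) : Decidable (Spec_trim_entries_for_display_py entries limit out) := by unfold Spec_trim_entries_for_display_py; infer_instance

-- ===== CLAIM (what is proved, stated in full; the proofs are below) =====
def Claim_equal_trim_entries_for_display_py : Prop := ∀ (entries : List String) (limit : Int), Dom_trim_entries_for_display_py entries limit → Spec_trim_entries_for_display_py entries limit (trim_entries_for_display_py entries limit)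

-- ===== LEMMAS AND PROOFS =====
-- keep l = the suffix A's loop stops at
def pvKeep (limit : Int) : List String → List String
  | [] => []
  | x :: xs => if pvTotalLen (x :: xs) > limit then pvKeep limit xs else x :: xs

theorem pvKeep_suffix (limit : Int) (l : List String) : (pvKeep limit l) <:+ l := by
  induction l with
  | nil => rfl
  | cons x xs ih =>
      simp only [pvKeep]
      split
      · exact ih.trans (List.suffix_cons x xs)
      · exact List.suffix_refl _

theorem pvKeep_length_le (limit : Int) (l : List String) : (pvKeep limit l).length ≤ l.length :=
  (pvKeep_suffix limit l).length_le

theorem pvLoopA_eq (limit : Int) (l : List String) (tr : Bool) :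
    pvLoopA limit l tr = (pvKeep limit l, tr || decide ((pvKeep limit l).length < l.length)) := by
  induction l generalizing tr with
  | nil => simp [pvLoopA, pvKeep]
  | cons x xs ih =>
      simp only [pvLoopA, pvKeep]
      split
      · rw [ih]
        have h := pvKeep_length_le limit xs
        simp only [List.length_cons]
        simp only [Prod.mk.injEq, Bool.true_or, true_and]
        have hb : (tr || decide ((pvKeep limit xs).length < xs.length + 1)) = true := by
          simp
          right
          omega
        exact hb.symm
      · simp

theorem pvTotalLen_nonneg (l : List String) : 0 ≤ pvTotalLen l := by
  unfold pvTotalLen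
  have h : 0 ≤ (l.map (fun s => PySem.Str.len s)).sum := by
    induction l with
    | nil => simp
    | cons a as ih =>
        simp only [List.map_cons, List.sum_cons]
        have : 0 ≤ PySem.Str.len a := by simp [PySem.Str.len_eq]
        omega
  have h2 : 0 ≤ max ((l.length : Int) - 1) 0 := le_max_right _ _
  omega

theorem pvTotalLen_cons (x : String) (xs : List String) :
    pvTotalLen (x :: xs) = pvTotalLen xs + PySem.Str.len x + (if xs.length ≠ 0 then 2 else 0) := by
  unfold pvTotalLen
  simp only [List.map_cons, List.sum_cons, List.length_cons]
  cases xs with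
  | nil => simp
  | cons b bs =>
      simp only [List.length_cons, ne_eq]
      push_cast
      rw [max_eq_left (by omega), max_eq_left (by omega)]
      simp
      ring

theorem pvTotalLen_le_cons (limit : Int) (x : String) (xs : List String)
    (h : pvTotalLen xs > limit) : pvTotalLen (x :: xs) > limit := by
  rw [pvTotalLen_cons]
  have hx : 0 ≤ PySem.Str.len x := by simp [PySem.Str.len_eq]
  split <;> omega

theorem pvKeep_append (limit : Int) (u v : List String) (h : pvTotalLen v > limit) :
    pvKeep limit (u ++ v) = pvKeep limit v := by
  induction u with
  | nil => simp
  | cons a u' ih =>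
      have hgt : pvTotalLen (a :: (u' ++ v)) > limit := by
        have : pvTotalLen (u' ++ v) > limit := by
          clear ih
          induction u' with
          | nil => simpa using h
          | cons b u'' ih2 => exact pvTotalLen_le_cons limit b _ ih2
        exact pvTotalLen_le_cons limit a _ this
      simp only [List.cons_append, pvKeep, hgt, if_pos]
      exact ih

theorem pvKeep_of_le (limit : Int) (l : List String) (h : pvTotalLen l ≤ limit) :
    pvKeep limit l = l := by
  cases l with
  | nil => rfl
  | cons x xs => simp only [pvKeep]; rw [if_neg (by omega)]

-- B's backward scan computes exactly the length of pvKeep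
theorem pvLoopB_eq (limit : Int) (l s : List String) (h : pvTotalLen s ≤ limit) :
    pvLoopB limit l (pvTotalLen s) s.length = (pvKeep limit (l.reverse ++ s)).length := by
  induction l generalizing s with
  | nil => simp [pvLoopB, pvKeep_of_le limit s h]
  | cons item rest ih =>
      simp only [pvLoopB, List.reverse_cons, List.append_assoc, List.cons_append,
        List.nil_append]
      have hcons : pvTotalLen s + (PySem.Str.len item + (if s.length ≠ 0 then 2 else 0))
          = pvTotalLen (item :: s) := by rw [pvTotalLen_cons]; ring
      rw [hcons]
      split
      · next hgt =>
          rw [pvKeep_append limit rest.reverse (item :: s) hgt]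
          simp only [pvKeep]
          rw [if_pos hgt, pvKeep_of_le limit s h]
      · next hle =>
          have := ih (item :: s) (by omega)
          simpa using this

theorem pvLoopB_neg (limit : Int) (hlim : limit < 0) (l : List String) :
    pvLoopB limit l 0 0 = 0 := by
  cases l with
  | nil => rfl
  | cons item rest =>
      simp only [pvLoopB]
      rw [if_pos]
      have : 0 ≤ PySem.Str.len item := by simp [PySem.Str.len_eq]
      simp; omega

theorem pvKeep_neg (limit : Int) (hlim : limit < 0) (l : List String) :
    pvKeep limit l = [] := by
  induction l with
  | nil => rfl
  | cons x xs ih =>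
      simp only [pvKeep]
      rw [if_pos (by have := pvTotalLen_nonneg (x :: xs); omega)]
      exact ih

theorem pvKeep_drop (limit : Int) (l : List String) :
    l.drop (l.length - (pvKeep limit l).length) = pvKeep limit l := by
  obtain ⟨t, ht⟩ := pvKeep_suffix limit l
  have hlen : t.length + (pvKeep limit l).length = l.length := by
    conv_rhs => rw [← ht]
    simp
  have hsub : l.length - (pvKeep limit l).length = t.length := by omega
  rw [hsub]
  conv_lhs => rw [← ht]
  simp

theorem pvKept_eq (entries : List String) (limit : Int) :
    pvLoopB limit entries.reverse 0 0 = (pvKeep limit entries).length := by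
  by_cases hlim : 0 ≤ limit
  · have h0 : pvTotalLen ([] : List String) = 0 := by simp [pvTotalLen]
    have := pvLoopB_eq limit entries.reverse ([]) (by rw [h0]; exact hlim)
    simpa [h0] using this
  · rw [pvLoopB_neg limit (by omega), pvKeep_neg limit (by omega)]
    rfl

-- ===== VERDICT (by name: the statement is the Claim_ definition above) =====
theorem trim_entries_for_display_py_spec : Claim_equal_trim_entries_for_display_py := by
  intro entries limit _
  unfold Spec_trim_entries_for_display_py trim_entries_for_display_py trim_entries_for_display_py_alt
  dsimp only
  rw [pvKept_eq, PySem.List.slice_from_natCast, pvKeep_drop]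
  cases entries with
  | nil => rfl
  | cons x xs =>
      rw [if_neg (by simp), pvLoopA_eq]
      simp
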